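-- pv_equiv track=rewrite | github.com/ankithakumari/SWPractice | stepNumbers.py | isStepnum2
-- ===== SOURCE A (Python) =====
-- def isStepnum2(num):
--     prev = num % 10
--     num = int(num/10)
--     while(num != 0):
--         curr = num % 10
--         if abs(curr - prev) != 1:
--             return False
--         prev = curr
--         num = int(num/10)
--     return True
-- ===== SOURCE B (Python) =====
-- def isStepnum2(num):
--     # Pass 1: extract all digits via the same arithmetic (Python %, trunc-toward-zero div).
--     digits = [num % 10]
--     num = int(num / 10)
--     while num != 0:
--         digits.append(num % 10)
--         num = int(num / 10)
--     # Pass 2: adjacency check over the digit sequence.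
--     return all(abs(a - b) == 1 for a, b in zip(digits, digits[1:]))
-- ===== Notes on version B (the rewrite author's own statement) =====
-- stated objective: alternative
-- what changed: A checks adjacency inline inside the single digit-extraction while loop; B first extracts the whole digit list in one pass, then checks in a separate pass that consecutive digits differ by one via all(...) over the list zipped with its tail.
import Mathlib
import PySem

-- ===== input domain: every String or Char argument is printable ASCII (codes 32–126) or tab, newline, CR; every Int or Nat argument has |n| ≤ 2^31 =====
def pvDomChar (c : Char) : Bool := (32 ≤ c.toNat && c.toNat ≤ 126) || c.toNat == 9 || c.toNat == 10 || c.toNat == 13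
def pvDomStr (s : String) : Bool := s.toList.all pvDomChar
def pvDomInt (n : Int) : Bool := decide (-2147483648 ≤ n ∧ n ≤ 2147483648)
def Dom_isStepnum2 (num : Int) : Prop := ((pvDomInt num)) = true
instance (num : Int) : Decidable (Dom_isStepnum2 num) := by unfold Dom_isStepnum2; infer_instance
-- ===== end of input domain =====

-- B splits A's inline single-pass check into a digit-extraction pass plus a separate
-- zip-with-tail adjacency pass (objective: alternative decomposition, same cost).

theorem pvTdivTenLt (n : Int) (h : n ≠ 0) : (n.tdiv 10).natAbs < n.natAbs := by
  have h1 : (n.tdiv 10).natAbs = n.natAbs / 10 := by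
    rw [Int.natAbs_tdiv]; rfl
  omega

-- ===== PORT A =====
-- while loop of A: state (prev, num); int(num/10) truncates toward zero = Int.tdiv (exact on Dom)
def isStepnum2Loop (prev num : Int) : Bool :=
  if h : num = 0 then true
  else
    let curr := PySem.Int.mod num 10
    if (curr - prev).natAbs ≠ 1 then false
    else isStepnum2Loop curr (num.tdiv 10)
termination_by num.natAbs
decreasing_by exact pvTdivTenLt num h

def isStepnum2 (num : Int) : Bool :=
  isStepnum2Loop (PySem.Int.mod num 10) (num.tdiv 10)

-- ===== PORT B =====
-- pass 1 of B: the remaining digits appended by the while loop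
def digitsLoop (num : Int) : List Int :=
  if h : num = 0 then []
  else PySem.Int.mod num 10 :: digitsLoop (num.tdiv 10)
termination_by num.natAbs
decreasing_by exact pvTdivTenLt num h

def isStepnum2_alt (num : Int) : Bool :=
  let digits := PySem.Int.mod num 10 :: digitsLoop (num.tdiv 10)
  -- pass 2: all(abs(a-b)==1 for a,b in zip(digits, digits[1:]))
  (digits.zip digits.tail).all (fun p => (p.1 - p.2).natAbs == 1)

-- ===== PRECONDITION & SPEC =====
def Spec_isStepnum2 (num : Int) (out : Bool) : Prop := out = isStepnum2_alt num
instance (num : Int) (out : Bool) : Decidable (Spec_isStepnum2 num out) := by unfold Spec_isStepnum2; infer_instance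

-- ===== CLAIM (what is proved, stated in full; the proofs are below) =====
def Claim_equal_isStepnum2 : Prop := ∀ (num : Int), Dom_isStepnum2 num → Spec_isStepnum2 num (isStepnum2 num)

-- ===== LEMMAS AND PROOFS =====
theorem loop_eq_pairs (prev num : Int) :
    isStepnum2Loop prev num =
      ((prev :: digitsLoop num).zip (digitsLoop num)).all (fun p => (p.1 - p.2).natAbs == 1) := by
  induction prev, num using isStepnum2Loop.induct with
  | case1 prev =>
      rw [isStepnum2Loop, digitsLoop]
      simp
  | case2 prev n h curr hne =>
      rw [isStepnum2Loop, digitsLoop, digitsLoop]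
      by_cases h10 : n.tdiv 10 = 0 <;>
        simp_all [List.all, curr] <;> omega
  | case3 prev n h curr hne ih =>
      rw [isStepnum2Loop, digitsLoop]
      rw [digitsLoop] at ih ⊢
      by_cases h10 : n.tdiv 10 = 0 <;>
        simp_all [List.all, curr] <;> omega

-- ===== VERDICT (by name: the statement is the Claim_ definition above) =====
theorem isStepnum2_spec : Claim_equal_isStepnum2 := by
  intro num _
  unfold Spec_isStepnum2 isStepnum2 isStepnum2_alt
  have := loop_eq_pairs (PySem.Int.mod num 10) (num.tdiv 10)
  simpa using this
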